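-- pv_equiv track=rewrite | github.com/revgizmo/octagon-numbers | streamlit_app.py | normalize_octal_str
-- ===== SOURCE A (Python) =====
-- def normalize_octal_str(s: str) -> str:
--     s = "".join(ch for ch in s if ch.isdigit())
--     if not s:
--         return "0"
--     digs = [int(c) for c in s]  # MSB->LSB (outer->inner)
--     i = len(digs) - 1
--     while i >= 0:
--         if digs[i] >= 8:
--             carry = digs[i] // 8
--             digs[i] %= 8
--             if i == 0:
--                 digs = [carry] + digs
--                 i += 1
--             else:
--                 digs[i-1] += carry
--         i -= 1
--     j = 0
--     while j < len(digs)-1 and digs[j] == 0: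
--         j += 1
--     digs = digs[j:]
--     return "".join(str(d) for d in digs)
-- ===== SOURCE B (Python) =====
-- def normalize_octal_str(s: str) -> str:
--     n = 0
--     for ch in s:
--         if ch.isdigit():
--             n = n * 8 + int(ch)
--     if n == 0:
--         return "0"
--     out = []
--     while n:
--         out.append(str(n % 8))
--         n //= 8
--     return "".join(reversed(out))
-- ===== Notes on version B (the rewrite author's own statement) =====
-- stated objective: simpler
-- what changed: B folds the kept digits into a single integer (n = n*8 + int(ch)) and then extracts its octal digits with divmod, instead of A's in-place carry-propagation over a mutable digit array followed by a leading-zero-stripping scan.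
import Mathlib
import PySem

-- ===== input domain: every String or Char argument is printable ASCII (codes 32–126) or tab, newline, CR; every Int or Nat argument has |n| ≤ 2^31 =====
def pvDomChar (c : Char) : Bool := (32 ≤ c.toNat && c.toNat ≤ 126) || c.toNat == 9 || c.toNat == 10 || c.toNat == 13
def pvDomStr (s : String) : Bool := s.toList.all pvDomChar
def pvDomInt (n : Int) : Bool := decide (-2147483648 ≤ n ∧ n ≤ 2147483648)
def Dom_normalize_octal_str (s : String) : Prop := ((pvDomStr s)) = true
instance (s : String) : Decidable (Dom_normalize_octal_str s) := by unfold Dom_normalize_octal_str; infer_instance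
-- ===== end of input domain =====

-- B replaces A's in-place carry propagation over a digit array by folding the kept digits into one
-- integer and extracting its octal digits (objective: simpler). Return value only; no observable mutation.

-- ===== PORT A =====
-- int(c) for a single char that passed isdigit(): exact on Dom, where isdigit ⇒ '0' ≤ c ≤ '9'
def pvDigitVal (c : Char) : Int := (c.toNat : Int) - 48

-- A's carry-propagation while-loop, state (digs, i); every index A uses is in range
def pvLoopA (digs : List Int) (i : Int) : List Int :=
  if h : 0 ≤ i then
    let d := PySem.List.pyGetD digs i 0
    if hd : 8 ≤ d then
      let carry := PySem.Int.floordiv d 8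
      let digs' := PySem.List.pySetD digs i (PySem.Int.mod d 8)
      if hi : i = 0 then
        pvLoopA (carry :: digs') 0
      else
        pvLoopA (PySem.List.pySetD digs' (i-1) (PySem.List.pyGetD digs' (i-1) 0 + carry)) (i-1)
    else
      pvLoopA digs (i-1)
  else digs
termination_by ((i+1).toNat, (PySem.List.pyGetD digs i 0).toNat)
decreasing_by
  · subst hi
    apply Prod.Lex.right'
    · omega
    · rw [PySem.List.pyGetD_zero_cons,
          PySem.Int.floordiv_eq_ediv_of_pos (by norm_num : (0:Int) < 8)]
      omega
  · apply Prod.Lex.left; omega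
  · apply Prod.Lex.left; omega


-- A's leading-zero strip: j advances while j < len(digs)-1 and digs[j] == 0; result is digs[j:]
def pvStripA (l : List Int) : List Int :=
  match l with
  | a :: b :: t => if a = 0 then pvStripA (b :: t) else a :: b :: t
  | l => l

def normalize_octal_str (s : String) : String :=
  let t := s.toList.filter (fun ch => PySem.Chars.isdigit ch)  -- "".join(ch for ch in s if ch.isdigit()), kept as List Char
  if t.isEmpty then "0"
  else
    let digs := t.map pvDigitVal
    let digs2 := pvLoopA digs ((digs.length : Int) - 1)
    let digs3 := pvStripA digs2
    PySem.Str.join "" (digs3.map PySem.Int.toStr)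

-- ===== PORT B =====
-- B's extraction loop: while n: out.append(str(n % 8)); n //= 8  (n is never negative here; 0 < n is the totality guard)
def pvExtractB (n : Int) (out : List String) : List String :=
  if h : 0 < n then
    pvExtractB (PySem.Int.floordiv n 8) (out ++ [PySem.Int.toStr (PySem.Int.mod n 8)])
  else out
termination_by n.toNat
decreasing_by
  have h8 : PySem.Int.floordiv n 8 = n / 8 := PySem.Int.floordiv_eq_ediv_of_pos (by norm_num)
  rw [h8]; omega

def normalize_octal_str_alt (s : String) : String :=
  let n := s.toList.foldl (fun n ch => if PySem.Chars.isdigit ch then n * 8 + pvDigitVal ch else n) 0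
  if n = 0 then "0"
  else PySem.Str.join "" (pvExtractB n []).reverse

-- ===== PRECONDITION & SPEC =====
def Spec_normalize_octal_str (s : String) (out : String) : Prop := out = normalize_octal_str_alt s
instance (s : String) (out : String) : Decidable (Spec_normalize_octal_str s out) := by unfold Spec_normalize_octal_str; infer_instance

-- ===== CLAIM (what is proved, stated in full; the proofs are below) =====
def Claim_equal_normalize_octal_str : Prop := ∀ (s : String), Dom_normalize_octal_str s → Spec_normalize_octal_str s (normalize_octal_str s)

-- ===== LEMMAS AND PROOFS =====

-- the base-8 value of a digit list, MSB first (the quantity both programs conserve)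
def pvVal (l : List Int) : Int := l.foldl (fun a d => a * 8 + d) 0

-- the canonical octal digit list of n (0 ≤ n), MSB first
def pvOcd (n : Int) : List Int :=
  if h : 8 ≤ n then pvOcd (n / 8) ++ [n % 8] else [n]
termination_by n.toNat
decreasing_by omega

lemma pvVal_foldl (l : List Int) (a : Int) :
    l.foldl (fun a d => a * 8 + d) a = a * 8 ^ l.length + pvVal l := by
  induction l generalizing a with
  | nil => simp [pvVal]
  | cons d t ih =>
    simp only [List.foldl_cons, List.length_cons, pvVal]
    rw [ih (a * 8 + d), ih (0 * 8 + d)]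
    ring

lemma pvVal_cons (d : Int) (t : List Int) : pvVal (d :: t) = d * 8 ^ t.length + pvVal t := by
  simp only [pvVal, List.foldl_cons, zero_mul, zero_add]
  exact pvVal_foldl t d

lemma pvVal_append (u v : List Int) : pvVal (u ++ v) = pvVal u * 8 ^ v.length + pvVal v := by
  rw [pvVal, List.foldl_append, ← pvVal, pvVal_foldl]

lemma pvVal_nonneg (l : List Int) (h : ∀ d ∈ l, 0 ≤ d) : 0 ≤ pvVal l := by
  induction l with
  | nil => simp [pvVal]
  | cons d t ih =>
    rw [pvVal_cons]
    have := h d (by simp)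
    have ht := ih (fun x hx => h x (by simp [hx]))
    positivity

lemma pvVal_pos (a : Int) (t : List Int) (ha : 0 < a) (ht : ∀ d ∈ t, 0 ≤ d) :
    0 < pvVal (a :: t) := by
  rw [pvVal_cons]
  have h1 : (0:Int) < 8 ^ t.length := by positivity
  have := pvVal_nonneg t ht
  nlinarith

-- xs[i] (0 ≤ i), in getD form
lemma pvPyGetD_eq (xs : List Int) (i : Int) (h0 : 0 ≤ i) :
    PySem.List.pyGetD xs i 0 = xs.getD i.toNat 0 := by
  lift i to Nat using h0 with k
  simp

-- xs[i] = v (0 ≤ i < len), as List.set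
lemma pvPySetD_eq (xs : List Int) (i : Int) (v : Int) (h0 : 0 ≤ i) (h1 : i < xs.length) :
    PySem.List.pySetD xs i v = xs.set i.toNat v := by
  have h : PySem.List.pyIdx? xs.length i = some i.toNat := by
    unfold PySem.List.pyIdx?
    rw [if_pos h0, if_pos h1]
  simp [PySem.List.pySetD, PySem.List.pySet?, h]

lemma pvGetD_set (l : List Int) (i j : Nat) (a : Int) :
    (l.set i a).getD j 0 = if i = j ∧ i < l.length then a else l.getD j 0 := by
  simp only [List.getD, List.getElem?_set]
  split_ifs with h1 h2 h3 h4 <;> simp_all <;> omega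

lemma pvVal_set (l : List Int) (k : Nat) (x : Int) (h : k < l.length) :
    pvVal (l.set k x) = pvVal l + (x - l.getD k 0) * 8 ^ (l.length - 1 - k) := by
  induction l generalizing k with
  | nil => simp at h
  | cons a t ih =>
    cases k with
    | zero =>
      simp only [List.set_cons_zero, List.getD_cons_zero, List.length_cons,
        Nat.add_sub_cancel, Nat.sub_zero]
      rw [pvVal_cons, pvVal_cons]; ring
    | succ k =>
      have hk : k < t.length := by simpa using h
      simp only [List.set_cons_succ, List.getD_cons_succ, List.length_cons]
      rw [pvVal_cons, pvVal_cons, ih k hk, List.length_set]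
      have he : t.length + 1 - 1 - (k + 1) = t.length - 1 - k := by omega
      rw [he]; ring

lemma pvLoopA_spec : ∀ (digs : List Int) (i : Int),
    i < digs.length →
    (∀ k : Nat, 0 ≤ digs.getD k 0) →
    (∀ k : Nat, i < (k : Int) → digs.getD k 0 < 8) →
    pvVal (pvLoopA digs i) = pvVal digs ∧
    (∀ k : Nat, 0 ≤ (pvLoopA digs i).getD k 0 ∧ (pvLoopA digs i).getD k 0 < 8) ∧
    digs.length ≤ (pvLoopA digs i).length := by
  intro digs i
  induction digs, i using pvLoopA.induct with
  | case1 digs h0 d hd carry digs' ih =>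
    intro hlen hnn hsuf
    have hl : 0 < digs.length := by exact_mod_cast hlen
    have hd8 : (0:Int) < 8 := by norm_num
    have hd0 : d = digs.getD 0 0 := by
      show PySem.List.pyGetD digs 0 0 = _
      rw [pvPyGetD_eq digs 0 (by norm_num)]
      norm_num
    have hcv : carry = PySem.Int.floordiv d 8 := rfl
    have hcnn : 0 ≤ carry := by
      rw [hcv, PySem.Int.floordiv_eq_ediv_of_pos hd8]
      have := hd; omega
    have hmnn : 0 ≤ PySem.Int.mod d 8 := PySem.Int.mod_nonneg d hd8
    have hmlt : PySem.Int.mod d 8 < 8 := PySem.Int.mod_lt d hd8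
    have hset : digs' = digs.set 0 (PySem.Int.mod d 8) := by
      show PySem.List.pySetD digs 0 (PySem.Int.mod d 8) = _
      rw [pvPySetD_eq digs 0 _ (by norm_num) hlen]
      norm_num
    have hlen' : digs'.length = digs.length := by rw [hset, List.length_set]
    have heq : pvLoopA digs 0 = pvLoopA (carry :: digs') 0 := by
      rw [pvLoopA, dif_pos h0, dif_pos hd, dif_pos rfl]
    have hcm : carry * 8 + PySem.Int.mod d 8 = d := by
      rw [hcv]; exact PySem.Int.floordiv_mul_add_mod d 8
    have hvala : pvVal (carry :: digs') = pvVal digs := by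
      rw [hset, pvVal_cons, List.length_set, pvVal_set digs 0 (PySem.Int.mod d 8) hl]
      have hpow : (8:Int) ^ digs.length = 8 * 8 ^ (digs.length - 1) := by
        conv_lhs => rw [show digs.length = (digs.length - 1) + 1 by omega]
        rw [pow_succ']
      rw [hpow, Nat.sub_zero, ← hd0]
      linear_combination (8:Int) ^ (digs.length - 1) * hcm
    obtain ⟨ihv, ihb, ihl⟩ := ih (by simp)
      (by
        intro k
        match k with
        | 0 => simpa using hcnn
        | (j+1) =>
          rw [List.getD_cons_succ, hset, pvGetD_set]
          split
          · exact hmnn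
          · exact hnn j)
      (by
        intro k hpos
        match k with
        | 0 => simp at hpos
        | (j+1) =>
          rw [List.getD_cons_succ, hset, pvGetD_set]
          split
          · exact hmlt
          · rename_i hcond
            have hj : 0 < j := by
              rcases Nat.eq_zero_or_pos j with hj | hj
              · exact absurd ⟨hj.symm, hl⟩ hcond
              · exact hj
            exact hsuf j (by exact_mod_cast hj))
    rw [heq]
    refine ⟨by rw [ihv, hvala], ihb, ?_⟩
    have : (carry :: digs').length = digs.length + 1 := by simp [hlen']
    omega
  | case2 digs i h0 d hd carry digs' hi ih =>
    intro hlen hnn hsuf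
    have hd8 : (0:Int) < 8 := by norm_num
    have hi1 : 1 ≤ i := by omega
    have hkl : i.toNat < digs.length := by omega
    have hd0 : d = digs.getD i.toNat 0 := by
      show PySem.List.pyGetD digs i 0 = _
      rw [pvPyGetD_eq digs i h0]
    have hcv : carry = PySem.Int.floordiv d 8 := rfl
    have hcnn : 0 ≤ carry := by
      rw [hcv, PySem.Int.floordiv_eq_ediv_of_pos hd8]
      have := hd; omega
    have hmnn : 0 ≤ PySem.Int.mod d 8 := PySem.Int.mod_nonneg d hd8
    have hmlt : PySem.Int.mod d 8 < 8 := PySem.Int.mod_lt d hd8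
    have hset : digs' = digs.set i.toNat (PySem.Int.mod d 8) := by
      show PySem.List.pySetD digs i (PySem.Int.mod d 8) = _
      exact pvPySetD_eq digs i _ h0 hlen
    have hlen' : digs'.length = digs.length := by rw [hset, List.length_set]
    have hgetp : PySem.List.pyGetD digs' (i-1) 0 = digs.getD (i.toNat - 1) 0 := by
      rw [pvPyGetD_eq digs' (i-1) (by omega), hset,
          show (i-1).toNat = i.toNat - 1 by omega, pvGetD_set]
      rw [if_neg (by omega)]
    have hsetv : PySem.List.pySetD digs' (i-1) (PySem.List.pyGetD digs' (i-1) 0 + carry) =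
        digs'.set (i.toNat - 1) (digs.getD (i.toNat - 1) 0 + carry) := by
      rw [pvPySetD_eq digs' (i-1) _ (by omega) (by rw [hlen']; exact_mod_cast (by omega : i - 1 < (digs.length : Int)))]
      rw [hgetp, show (i-1).toNat = i.toNat - 1 by omega]
    set newl := digs'.set (i.toNat - 1) (digs.getD (i.toNat - 1) 0 + carry) with hnewl
    have hlenn : newl.length = digs.length := by rw [hnewl, List.length_set, hlen']
    have heq : pvLoopA digs i = pvLoopA newl (i-1) := by
      rw [pvLoopA, dif_pos h0, dif_pos hd, dif_neg hi, hsetv]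
    have hcm : carry * 8 + PySem.Int.mod d 8 = d := by
      rw [hcv]; exact PySem.Int.floordiv_mul_add_mod d 8
    have hvala : pvVal newl = pvVal digs := by
      have h1 : pvVal digs' = pvVal digs +
          (PySem.Int.mod d 8 - d) * 8 ^ (digs.length - 1 - i.toNat) := by
        rw [hset, pvVal_set digs i.toNat (PySem.Int.mod d 8) hkl, ← hd0]
      have hgd' : digs'.getD (i.toNat - 1) 0 = digs.getD (i.toNat - 1) 0 := by
        rw [hset, pvGetD_set, if_neg (by omega)]
      have h2 : pvVal newl = pvVal digs' + carry * 8 ^ (digs.length - 1 - (i.toNat - 1)) := by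
        rw [hnewl, pvVal_set digs' (i.toNat - 1) _ (by omega), hgd', hlen']
        ring
      rw [h2, h1]
      have hexp : digs.length - 1 - (i.toNat - 1) = (digs.length - 1 - i.toNat) + 1 := by omega
      rw [hexp, pow_succ]
      linear_combination (8:Int) ^ (digs.length - 1 - i.toNat) * hcm
    rw [hsetv] at ih
    obtain ⟨ihv, ihb, ihl⟩ := ih (by rw [hlenn]; omega)
      (by
        intro k
        rw [hnewl, pvGetD_set]
        split
        · have := hnn (i.toNat - 1); omega
        · rw [hset, pvGetD_set]
          split
          · exact hmnn
          · exact hnn k)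
      (by
        intro k hik
        rw [hnewl, pvGetD_set, if_neg (by omega)]
        rw [hset, pvGetD_set]
        split
        · exact hmlt
        · rename_i hcond
          refine hsuf k ?_
          by_cases hik' : (k : Int) = i
          · exact absurd ⟨by omega, by omega⟩ hcond
          · omega)
    rw [heq]
    refine ⟨by rw [ihv, hvala], ihb, ?_⟩
    have := hlenn
    omega
  | case3 digs i h0 d hnd ih =>
    intro hlen hnn hsuf
    have heq : pvLoopA digs i = pvLoopA digs (i - 1) := by
      rw [pvLoopA]; rw [dif_pos h0]; exact dif_neg hnd
    rw [heq]
    refine ih (by omega) hnn ?_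
    intro k hik
    by_cases hki : (k : Int) = i
    · have hk : k = i.toNat := by omega
      subst hk
      have hnd' : ¬ 8 ≤ PySem.List.pyGetD digs i 0 := hnd
      rw [pvPyGetD_eq digs i h0] at hnd'
      omega
    · exact hsuf k (by omega)
  | case4 digs i h0 =>
    intro hlen hnn hsuf
    have heq : pvLoopA digs i = digs := by rw [pvLoopA, dif_neg h0]
    rw [heq]
    refine ⟨rfl, ?_, le_refl _⟩
    intro k
    exact ⟨hnn k, hsuf k (by omega)⟩

-- a canonical digit list (head nonzero, or a singleton) is pvOcd of its value
lemma pvOcd_of_canonical (l : List Int) (hne : l ≠ [])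
    (hdig : ∀ d ∈ l, 0 ≤ d ∧ d < 8)
    (hhead : l.length = 1 ∨ l.getD 0 0 ≠ 0) :
    pvOcd (pvVal l) = l := by
  induction l using List.reverseRecOn with
  | nil => exact absurd rfl hne
  | append_singleton u x ih =>
    match u with
    | [] =>
      have hx := hdig x (by simp)
      have hv : pvVal [x] = x := by rw [pvVal_cons]; simp [pvVal]
      simp only [List.nil_append]
      rw [hv, pvOcd, dif_neg (by omega)]
    | a :: u' =>
      have hhd : a ≠ 0 := by
        rcases hhead with h1 | h2
        · simp at h1
        · simpa using h2
      have ha : 0 < a := by have := hdig a (by simp); omega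
      have hmem : ∀ d ∈ a :: u', d ∈ a :: u' ++ [x] := by
        intro d hd; simp at hd ⊢; tauto
      have hvu : 0 < pvVal (a :: u') := pvVal_pos a u' ha
        (fun d hd => (hdig d (hmem d (by simp [hd]))).1)
      have hx := hdig x (by simp)
      have hval : pvVal ((a :: u') ++ [x]) = pvVal (a :: u') * 8 + x := by
        rw [pvVal_append]; rw [pvVal_cons]; simp [pvVal]
      rw [hval, pvOcd, dif_pos (by omega)]
      have hdiv : (pvVal (a :: u') * 8 + x) / 8 = pvVal (a :: u') := by omega
      have hmod : (pvVal (a :: u') * 8 + x) % 8 = x := by omega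
      rw [hdiv, hmod, ih (by simp) (fun d hd => hdig d (hmem d hd)) (Or.inr (by simpa using hhd))]

-- A's strip produces exactly the canonical octal digit list of the value
lemma pvStripA_eq_ocd (l : List Int) (hne : l ≠ []) (hdig : ∀ d ∈ l, 0 ≤ d ∧ d < 8) :
    pvStripA l = pvOcd (pvVal l) := by
  induction l with
  | nil => exact absurd rfl hne
  | cons a t ih =>
    match t with
    | [] =>
      have h1 : pvStripA [a] = [a] := rfl
      rw [h1]
      exact (pvOcd_of_canonical [a] (by simp) hdig (Or.inl rfl)).symm
    | b :: t' =>
      have h1 : pvStripA (a :: b :: t') = if a = 0 then pvStripA (b :: t') else a :: b :: t' := rfl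
      rw [h1]
      by_cases ha : a = 0
      · rw [if_pos ha]
        have hv : pvVal (a :: b :: t') = pvVal (b :: t') := by
          rw [pvVal_cons, ha]; ring
        rw [hv]
        exact ih (by simp) (fun d hd => hdig d (by simp [hd]))
      · rw [if_neg ha]
        exact (pvOcd_of_canonical (a :: b :: t') (by simp) hdig (Or.inr (by simpa using ha))).symm

-- B's extraction produces the canonical octal digits, LSB first, rendered
lemma pvExtractB_eq (n : Int) (out : List String) (hn : 0 < n) :
    pvExtractB n out = out ++ ((pvOcd n).map PySem.Int.toStr).reverse := by
  induction n using pvOcd.induct generalizing out with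
  | case1 n h ih =>
    rw [pvExtractB, dif_pos hn, pvOcd, dif_pos h,
        PySem.Int.floordiv_eq_ediv_of_pos (by norm_num : (0:Int) < 8),
        PySem.Int.mod_eq_emod_of_pos (by norm_num : (0:Int) < 8)]
    rw [ih (out ++ [PySem.Int.toStr (n % 8)]) (by omega)]
    simp
  | case2 n h =>
    rw [pvExtractB, dif_pos hn, pvOcd, dif_neg h,
        PySem.Int.floordiv_eq_ediv_of_pos (by norm_num : (0:Int) < 8),
        PySem.Int.mod_eq_emod_of_pos (by norm_num : (0:Int) < 8)]
    have h0 : n / 8 = 0 := by omega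
    have h1 : n % 8 = n := by omega
    rw [h0, h1, pvExtractB, dif_neg (by omega : ¬ (0:Int) < 0)]
    simp

-- B's fold is A's "filter then per-char int()" read as a base-8 value
lemma pvFoldB_eq (cs : List Char) (a : Int) :
    cs.foldl (fun n ch => if PySem.Chars.isdigit ch then n * 8 + pvDigitVal ch else n) a =
    ((cs.filter (fun ch => PySem.Chars.isdigit ch)).map pvDigitVal).foldl (fun a d => a * 8 + d) a := by
  induction cs generalizing a with
  | nil => rfl
  | cons c t ih =>
    by_cases h : PySem.Chars.isdigit c = true
    · simp [h, ih]
    · simp [h, ih]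

lemma pvDigitVal_bounds (c : Char) (h : PySem.Chars.isdigit c = true) :
    0 ≤ pvDigitVal c ∧ pvDigitVal c ≤ 9 := by
  have hb : 48 ≤ c.toNat ∧ c.toNat ≤ 57 := by
    simp only [PySem.Chars.isdigit, Bool.and_eq_true, decide_eq_true_eq] at h
    obtain ⟨h1, h2⟩ := h
    rw [Char.le_def] at h1 h2
    rw [UInt32.le_iff_toBitVec_le, BitVec.le_def] at h1 h2
    exact ⟨h1, h2⟩
  simp only [pvDigitVal]
  omega


-- ===== VERDICT (by name: the statement is the Claim_ definition above) =====
theorem normalize_octal_str_spec : Claim_equal_normalize_octal_str := by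
  unfold Claim_equal_normalize_octal_str Spec_normalize_octal_str
  intro s _
  simp only [normalize_octal_str, normalize_octal_str_alt]
  set t := s.toList.filter (fun ch => PySem.Chars.isdigit ch) with ht
  set digs := t.map pvDigitVal with hdigs
  have hfold : s.toList.foldl
      (fun n ch => if PySem.Chars.isdigit ch then n * 8 + pvDigitVal ch else n) 0 = pvVal digs := by
    rw [pvFoldB_eq, ← ht, ← hdigs, pvVal]
  rw [hfold]
  by_cases hemp : t.isEmpty
  · rw [if_pos hemp]
    have hte : t = [] := List.isEmpty_iff.mp hemp
    have : pvVal digs = 0 := by rw [hdigs, hte]; rfl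
    rw [if_pos this]
  · rw [if_neg hemp]
    have hte : t ≠ [] := by
      intro h; exact hemp (by rw [h]; rfl)
    have hdl : 0 < digs.length := by
      rw [hdigs, List.length_map]
      exact List.length_pos_of_ne_nil hte
    have hnonneg_digs : ∀ d ∈ digs, 0 ≤ d ∧ d ≤ 9 := by
      intro d hd
      rw [hdigs] at hd
      obtain ⟨c, hc, rfl⟩ := List.mem_map.mp hd
      have hdig := (List.mem_filter.mp (ht ▸ hc)).2
      exact pvDigitVal_bounds c hdig
    have hnn : ∀ k : Nat, 0 ≤ digs.getD k 0 := by
      intro k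
      by_cases hk : k < digs.length
      · rw [List.getD_eq_getElem digs 0 hk]
        exact (hnonneg_digs _ (List.getElem_mem hk)).1
      · rw [List.getD_eq_default digs 0 (by omega)]
    have hsuf : ∀ k : Nat, (digs.length : Int) - 1 < (k : Int) → digs.getD k 0 < 8 := by
      intro k hik
      rw [List.getD_eq_default digs 0 (by omega)]
      norm_num
    obtain ⟨hval, hb, hl⟩ := pvLoopA_spec digs ((digs.length : Int) - 1) (by omega) hnn hsuf
    set r := pvLoopA digs ((digs.length : Int) - 1) with hr
    have hrne : r ≠ [] := List.ne_nil_of_length_pos (by omega)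
    have hrb : ∀ d ∈ r, 0 ≤ d ∧ d < 8 := by
      intro d hd
      obtain ⟨k, hk, rfl⟩ := List.getElem_of_mem hd
      have hbk := hb k
      rwa [List.getD_eq_getElem r 0 hk] at hbk
    rw [pvStripA_eq_ocd r hrne hrb, hval]
    by_cases hz : pvVal digs = 0
    · rw [hz, if_pos rfl]
      have hocd : pvOcd 0 = [0] := by rw [pvOcd]; norm_num
      rw [hocd]
      decide
    · have hpos : 0 < pvVal digs :=
        lt_of_le_of_ne (pvVal_nonneg digs (fun d hd => (hnonneg_digs d hd).1)) (Ne.symm hz)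
      rw [if_neg hz, pvExtractB_eq _ [] hpos]
      simp
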